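-- pv_equiv track=rewrite | github.com/struggling-student/PythonExercises | Esami/2021-2022/Esame-6/2022-2023/Esame-1/program.iac.py | gen_exp
-- ===== SOURCE A (Python) =====
-- def gen_exp(nums, ops):
--     # questo forse era l'esercizio piu difficile
--     # e' un caso di PERMUTAZIONI (si veda lezione) dove ogni volta
--     # pero' bisogno concatenare anche l'operazione oltre
--     # al numero. Quando si propaga la ricorsione ricordarsi di
--     # togliere il numero usato e di non togliere niente dalle
--     # operazioni.
--     if not nums:
--         return ['']
--     if len(nums) == 1:
--         return list(map(str, nums))
--     return [''.join([str(num), o, gs])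
--             for num in nums
--             for o in ops
--             for gs in gen_exp(nums-{num}, ops)]
-- ===== SOURCE B (Python) =====
-- def gen_exp(nums, ops):
--     if not nums:
--         return ['']
--     states = [('', nums)]
--     for _ in range(len(nums) - 1):
--         states = [(p + str(n) + o, rest - {n})
--                   for (p, rest) in states for n in rest for o in ops]
--     return [p + str(n) for (p, rest) in states for n in rest]
-- ===== Notes on version B (the rewrite author's own statement) =====
-- stated objective: alternative
-- what changed: Replaces A's naive recursion (which re-derives each suffix list per (num,op) pair) with an iterative breadth-first worklist of (prefix, remaining-numbers) states expanded level by level, computing each prefix exactly once.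
import Mathlib
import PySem

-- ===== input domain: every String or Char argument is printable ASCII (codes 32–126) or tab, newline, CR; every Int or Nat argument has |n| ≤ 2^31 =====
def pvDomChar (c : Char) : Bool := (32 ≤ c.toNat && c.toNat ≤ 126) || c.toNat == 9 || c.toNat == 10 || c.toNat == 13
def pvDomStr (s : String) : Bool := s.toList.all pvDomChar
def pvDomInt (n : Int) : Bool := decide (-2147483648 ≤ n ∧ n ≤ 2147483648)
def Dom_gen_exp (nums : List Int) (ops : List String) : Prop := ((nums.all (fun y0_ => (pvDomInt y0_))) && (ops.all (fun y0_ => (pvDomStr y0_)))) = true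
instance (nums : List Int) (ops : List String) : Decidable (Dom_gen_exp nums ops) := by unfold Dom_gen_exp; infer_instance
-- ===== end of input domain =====

-- B replaces A's naive recursion by an iterative breadth-first worklist of
-- (prefix, remaining numbers) states; same return value, similar cost (objective: alternative).

-- ===== PORT A =====
-- termination helper for the recursion of port A (cited in decreasing_by)
theorem pv_filter_ne_length_lt (l : List Int) (a : Int) (h : a ∈ l) :
    (l.filter (fun y => y != a)).length < l.length := by
  induction l with
  | nil => cases h
  | cons b t ih =>
    by_cases hba : (b != a) = true
    · have hat : a ∈ t := by
        rcases List.mem_cons.mp h with rfl | ht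
        · simp at hba
        · exact ht
      simpa [List.filter, hba] using Nat.succ_lt_succ (ih hat)
    · simp only [List.filter, hba]
      exact Nat.lt_succ_of_le (List.length_filter_le _ t)

def gen_exp (nums : List Int) (ops : List String) : List String :=
  if nums = [] then [""]
  else if nums.length = 1 then nums.map PySem.Int.toStr
  else nums.flatMap (fun num =>
    ops.flatMap (fun o =>
      (gen_exp (nums.filter (fun y => y != num)) ops).map
        (fun gs => PySem.Int.toStr num ++ o ++ gs)))
termination_by nums.length
decreasing_by simpa using pv_filter_ne_length_lt nums num (by assumption)

-- ===== PORT B =====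
def gen_exp_alt (nums : List Int) (ops : List String) : List String :=
  if nums = [] then [""]
  else
    let states := (List.range (nums.length - 1)).foldl
      (fun st _ => st.flatMap (fun pr =>
        pr.2.flatMap (fun n => ops.map (fun o =>
          (pr.1 ++ PySem.Int.toStr n ++ o, pr.2.filter (fun y => y != n))))))
      [("", nums)]
    states.flatMap (fun pr => pr.2.map (fun n => pr.1 ++ PySem.Int.toStr n))

-- ===== PRECONDITION & SPEC =====
-- Pre_ requires the elements of nums to be distinct: the Python parameter is a set,
-- so a list with duplicate entries does not represent any input of the Python function.
def Pre_gen_exp (nums : List Int) (ops : List String) : Prop := nums.Nodup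
instance (nums : List Int) (ops : List String) : Decidable (Pre_gen_exp nums ops) := by
  unfold Pre_gen_exp; infer_instance
def pvWitness_gen_exp : List Int × List String := ([1, 2], ["+"])

def Spec_gen_exp (nums : List Int) (ops : List String) (out : List String) : Prop := out = gen_exp_alt nums ops
instance (nums : List Int) (ops : List String) (out : List String) : Decidable (Spec_gen_exp nums ops out) := by unfold Spec_gen_exp; infer_instance

-- ===== CLAIM (what is proved, stated in full; the proofs are below) =====
def Claim_equal_gen_exp : Prop := ∀ (nums : List Int) (ops : List String), Dom_gen_exp nums ops → Pre_gen_exp nums ops → Spec_gen_exp nums ops (gen_exp nums ops)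

-- ===== LEMMAS AND PROOFS =====

-- the loop body of B's worklist iteration, and the final flattening step
def pvStep (ops : List String) (st : List (String × List Int)) : List (String × List Int) :=
  st.flatMap (fun pr =>
    pr.2.flatMap (fun n => ops.map (fun o =>
      (pr.1 ++ PySem.Int.toStr n ++ o, pr.2.filter (fun y => y != n)))))

def pvFin (st : List (String × List Int)) : List String :=
  st.flatMap (fun pr => pr.2.map (fun n => pr.1 ++ PySem.Int.toStr n))

theorem pv_foldl_iterate {α β : Type} (g : α → α) (l : List β) (i : α) :
    l.foldl (fun s _ => g s) i = g^[l.length] i := by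
  induction l generalizing i with
  | nil => rfl
  | cons b t ih => simpa [Function.iterate_succ_apply] using ih (g i)

theorem pv_flatMap_congr_mem {α β : Type} {l : List α} {f g : α → List β}
    (h : ∀ a ∈ l, f a = g a) : l.flatMap f = l.flatMap g := by
  induction l with
  | nil => rfl
  | cons b t ih =>
    simp only [List.flatMap_cons]
    rw [h b (by simp), ih (fun a ha => h a (by simp [ha]))]

-- B's port rewritten through pvStep/pvFin
theorem pv_alt_eq (nums : List Int) (ops : List String) (h : nums ≠ []) :
    gen_exp_alt nums ops = pvFin ((pvStep ops)^[nums.length - 1] [("", nums)]) := by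
  unfold gen_exp_alt
  rw [if_neg h]
  show pvFin ((List.range (nums.length - 1)).foldl (fun st _ => pvStep ops st) [("", nums)]) = _
  rw [pv_foldl_iterate (pvStep ops), List.length_range]

-- main invariant: flattening after k expansion rounds equals prefixing A's results
theorem pv_main (ops : List String) :
    ∀ (k : Nat) (st : List (String × List Int)),
      (∀ pr ∈ st, pr.2.Nodup ∧ pr.2.length = k + 1) →
      pvFin ((pvStep ops)^[k] st)
        = st.flatMap (fun pr => (gen_exp pr.2 ops).map (fun gs => pr.1 ++ gs)) := by
  intro k
  induction k with
  | zero =>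
    intro st h
    simp only [Function.iterate_zero, id]
    unfold pvFin
    refine pv_flatMap_congr_mem (fun pr hpr => ?_)
    obtain ⟨hnd, hlen⟩ := h pr hpr
    have hne : pr.2 ≠ [] := by intro e; rw [e] at hlen; simp at hlen
    rw [gen_exp.eq_def, if_neg hne, if_pos hlen, List.map_map]
    rfl
  | succ k ih =>
    intro st h
    rw [Function.iterate_succ_apply,
        ih (pvStep ops st) (by
          intro pr' hpr'
          unfold pvStep at hpr'
          simp only [List.mem_flatMap, List.mem_map] at hpr'
          obtain ⟨pr, hpr, n, hn, o, ho, rfl⟩ := hpr'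
          obtain ⟨hnd, hlen⟩ := h pr hpr
          refine ⟨hnd.filter _, ?_⟩
          rw [← List.Nodup.erase_eq_filter hnd n, List.length_erase_of_mem hn, hlen]; omega)]
    unfold pvStep
    rw [List.flatMap_assoc]
    refine pv_flatMap_congr_mem (fun pr hpr => ?_)
    obtain ⟨hnd, hlen⟩ := h pr hpr
    have hne : pr.2 ≠ [] := by intro e; rw [e] at hlen; simp at hlen
    have hlen1 : ¬ pr.2.length = 1 := by omega
    rw [List.flatMap_assoc, gen_exp.eq_def, if_neg hne, if_neg hlen1, List.map_flatMap]
    refine pv_flatMap_congr_mem (fun n hn => ?_)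
    rw [List.flatMap_map, List.map_flatMap]
    refine pv_flatMap_congr_mem (fun o ho => ?_)
    rw [List.map_map]
    refine List.map_congr_left (fun gs _ => ?_)
    simp [String.append_assoc]

-- ===== VERDICT (by name: the statement is the Claim_ definition above) =====
theorem gen_exp_spec : Claim_equal_gen_exp := by
  intro nums ops _ hpre
  unfold Spec_gen_exp
  by_cases h : nums = []
  · subst h; rw [gen_exp.eq_def]; simp [gen_exp_alt]
  · have hlen : nums.length - 1 + 1 = nums.length := by
      have := List.length_pos_of_ne_nil h; omega
    rw [pv_alt_eq nums ops h,
        pv_main ops (nums.length - 1) [("", nums)]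
          (by intro pr hpr; simp at hpr; subst hpr; exact ⟨hpre, hlen.symm⟩)]
    simp [String.empty_append]
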